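-- pv_equiv track=rewrite | github.com/queelius/computational-explorations | src/adversarial_rcop4.py | enumerate_coprime_kcliques
-- ===== SOURCE A (Python) =====
-- import math
-- from typing import Dict, FrozenSet, List, Optional, Set, Tuple
--
-- def coprime_adjacency(n: int) -> Dict[int, Set[int]]:
--     """Build adjacency dict for coprime graph on [n]."""
--     adj: Dict[int, Set[int]] = {v: set() for v in range(1, n + 1)}
--     for i in range(1, n + 1):
--         for j in range(i + 1, n + 1):
--             if math.gcd(i, j) == 1:
--                 adj[i].add(j)
--                 adj[j].add(i)
--     return adj
--
-- def enumerate_coprime_kcliques(n: int, k: int) -> List[Tuple[int, ...]]: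
--     """
--     Enumerate ALL k-element subsets of [n] that are pairwise coprime.
--
--     Uses Bron-Kerbosch-style backtracking with pruning.
--     Returns sorted tuples, each in ascending order.
--     """
--     if k < 1 or k > n:
--         return []
--     adj = coprime_adjacency(n)
--     result: List[Tuple[int, ...]] = []
--
--     def backtrack(partial: List[int], candidates: List[int]):
--         if len(partial) == k:
--             result.append(tuple(partial))
--             return
--         need = k - len(partial)
--         for idx, v in enumerate(candidates):
--             if len(candidates) - idx < need:
--                 break  # not enough left
--             # v must be coprime to every member of partial
--             if all(v in adj[u] for u in partial):
--                 # restrict future candidates to those > v and adjacent to v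
--                 new_cand = [w for w in candidates[idx + 1:] if w in adj[v]]
--                 backtrack(partial + [v], new_cand)
--
--     backtrack([], list(range(1, n + 1)))
--     return result
-- ===== SOURCE B (Python) =====
-- import math
--
--
-- def enumerate_coprime_kcliques(n, k):
--     """Iterative DFS over an explicit worklist stack; coprime *successors* of each value
--     are precomputed once (no symmetric adjacency dict, no recursion, no re-check of the
--     prefix: the candidate list is kept coprime to the whole prefix by construction)."""
--     if k < 1 or k > n:
--         return []
--     succ = {v: frozenset(w for w in range(v + 1, n + 1) if math.gcd(v, w) == 1)
--             for v in range(1, n + 1)}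
--     out = []
--     stack = [((), list(range(1, n + 1)))]
--     while stack:
--         s, cand = stack.pop()
--         if len(s) == k:
--             out.append(s)
--             continue
--         need = k - len(s)
--         exts = []
--         for i, v in enumerate(cand):
--             if len(cand) - i < need:
--                 break  # too few candidates left for a full clique
--             sv = succ[v]
--             exts.append((s + (v,), [w for w in cand[i + 1:] if w in sv]))
--         stack.extend(reversed(exts))
--     return out
-- ===== Notes on version B (the rewrite author's own statement) =====
-- stated objective: alternative
-- what changed: Replaced the symmetric coprime-graph adjacency dict and Bron-Kerbosch-style recursive backtracking (which re-checks every candidate against the whole prefix) by a per-value coprime-successor table plus an iterative DFS over an explicit worklist stack that never re-checks the prefix (candidate lists are coprime to the prefix by construction).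
import Mathlib
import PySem

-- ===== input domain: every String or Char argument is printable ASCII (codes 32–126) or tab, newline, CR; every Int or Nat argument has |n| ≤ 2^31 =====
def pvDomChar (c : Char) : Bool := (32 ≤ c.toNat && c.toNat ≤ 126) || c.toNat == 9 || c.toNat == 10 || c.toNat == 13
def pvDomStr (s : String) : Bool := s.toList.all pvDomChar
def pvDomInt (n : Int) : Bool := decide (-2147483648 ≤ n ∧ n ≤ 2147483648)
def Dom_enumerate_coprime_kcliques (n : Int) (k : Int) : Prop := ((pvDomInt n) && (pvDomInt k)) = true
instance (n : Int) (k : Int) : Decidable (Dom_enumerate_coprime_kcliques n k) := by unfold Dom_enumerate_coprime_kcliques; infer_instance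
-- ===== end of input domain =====

-- B replaces A's symmetric adjacency dict + recursive backtracking by a per-value coprime-successor table and an iterative explicit-stack DFS with no prefix re-check (alternative structure; similar cost).

-- ===== PORT A =====

-- coprime_adjacency: {v: set() for v in range(1, n+1)}, then the double loop adding both directions.
-- (Python's adj[i] lookup is via getD with default []: every key it touches is present, so this is exact here.)
def coprime_adjacency (n : Int) : PySem.Dict Int (PySem.Set Int) :=
  let adj : PySem.Dict Int (PySem.Set Int) :=
    (PySem.List.pyRange 1 (n + 1)).foldl (fun d v => d.insert v []) PySem.Dict.empty
  (PySem.List.pyRange 1 (n + 1)).foldl (fun d i =>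
    (PySem.List.pyRange (i + 1) (n + 1)).foldl (fun d j =>
      if Int.gcd i j = 1 then
        (d.modify i [] (fun s => PySem.Set.add s j)).modify j [] (fun s => PySem.Set.add s i)
      else d) d) adj

-- the nested 'backtrack' closure: btkA is the function body, btkLoop the 'for idx, v in enumerate(candidates)'
-- loop walked as the suffix candidates[idx:] (so 'len(candidates) - idx' is the suffix length; 'break' = return []).
mutual
  def btkA (adj : PySem.Dict Int (PySem.Set Int)) (k : Int)
      (pf : List Int) (cands : List Int) : List (List Int) :=
    if (pf.length : Int) = k then [pf]
    else btkLoop adj k pf cands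
  termination_by (cands.length, 1)
  decreasing_by exact Prod.Lex.right _ (by omega)

  def btkLoop (adj : PySem.Dict Int (PySem.Set Int)) (k : Int)
      (pf : List Int) (cands : List Int) : List (List Int) :=
    match cands with
    | [] => []
    | v :: rest =>
      if (cands.length : Int) < k - (pf.length : Int) then []
      else
        (if pf.all (fun u => PySem.Set.contains (adj.getD u []) v) then
          btkA adj k (pf ++ [v])
            (rest.filter (fun w => PySem.Set.contains (adj.getD v []) w))
        else []) ++ btkLoop adj k pf rest
  termination_by (cands.length, 0)
  decreasing_by
    · exact Prod.Lex.left _ _ (by simpa using Nat.lt_succ_of_le (List.length_filter_le _ rest))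
    · exact Prod.Lex.left _ _ (by simp)
end

def enumerate_coprime_kcliques (n : Int) (k : Int) : List (List Int) :=
  if k < 1 ∨ k > n then []
  else btkA (coprime_adjacency n) k [] (PySem.List.pyRange 1 (n + 1))

-- ===== PORT B =====

-- succ = {v: frozenset(w for w in range(v+1, n+1) if math.gcd(v, w) == 1) for v in range(1, n+1)}
def succD (n : Int) : PySem.Dict Int (PySem.Set Int) :=
  (PySem.List.pyRange 1 (n + 1)).foldl
    (fun d v => d.insert v (PySem.Set.ofList
      ((PySem.List.pyRange (v + 1) (n + 1)).filter (fun w => Int.gcd v w == 1))))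
    PySem.Dict.empty

-- the 'for i, v in enumerate(cand): … break …' loop building exts, walked as the suffix
-- cand[i:] (so 'len(cand) - i' is the suffix length; 'break' = stop = []).
-- (succ[v] is read via getD with default []: v is always a present key here, so this is exact.)
def extsB (k : Int) (s : List Int) (sd : PySem.Dict Int (PySem.Set Int)) :
    List Int → List (List Int × List Int)
  | [] => []
  | v :: rest =>
      if ((v :: rest).length : Int) < k - (s.length : Int) then []
      else (s ++ [v], rest.filter (fun w => PySem.Set.contains (sd.getD v []) w))
        :: extsB k s sd rest

-- termination measure for the worklist loop: each popped entry is replaced by extensions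
-- whose candidate lists are strictly shorter suffix-filters
theorem extsB_measure_lt (k : Int) (s : List Int) (sd : PySem.Dict Int (PySem.Set Int))
    (cand : List Int) :
    ((extsB k s sd cand).map (fun p => (p.2.length + 1).factorial)).sum
      < (cand.length + 1).factorial := by
  induction cand with
  | nil => simp [extsB, Nat.factorial]
  | cons v rest ih =>
      rw [extsB]
      split
      · simp only [List.map_nil, List.sum_nil]
        exact Nat.factorial_pos _
      · simp only [List.map_cons, List.sum_cons, List.length_cons]
        have h1 : ((rest.filter (fun w => PySem.Set.contains (sd.getD v []) w)).length + 1).factorial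
            ≤ (rest.length + 1).factorial :=
          Nat.factorial_le (by have h0 := List.length_filter_le (fun w => PySem.Set.contains (sd.getD v []) w) rest; omega)
        have h2 : (rest.length + 1 + 1).factorial = (rest.length + 2) * (rest.length + 1).factorial := rfl
        have h3 := ih
        have h4 : 2 * (rest.length + 1).factorial ≤ (rest.length + 2) * (rest.length + 1).factorial :=
          Nat.mul_le_mul_right _ (by omega)
        omega

-- the 'while stack: …' loop; the Python stack keeps its top at the END and pushes
-- extend(reversed(exts)); it is modelled here with the top at the HEAD, so a push is
-- 'exts ++ stack' and successive pops visit exts left to right — the same visit order.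
def dfsB (k : Int) (sd : PySem.Dict Int (PySem.Set Int)) (out : List (List Int))
    (stack : List (List Int × List Int)) : List (List Int) :=
  match stack with
  | [] => out
  | (s, cand) :: rest =>
      if (s.length : Int) = k then dfsB k sd (out ++ [s]) rest
      else dfsB k sd out (extsB k s sd cand ++ rest)
termination_by (stack.map (fun p => (p.2.length + 1).factorial)).sum
decreasing_by
  · simp only [List.map_cons, List.sum_cons]
    have := Nat.factorial_pos (cand.length + 1)
    omega
  · simp only [List.map_cons, List.sum_cons, List.map_append, List.sum_append]
    have := extsB_measure_lt k s sd cand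
    omega

def enumerate_coprime_kcliques_alt (n : Int) (k : Int) : List (List Int) :=
  if k < 1 ∨ k > n then []
  else dfsB k (succD n) [] [([], PySem.List.pyRange 1 (n + 1))]

-- ===== PRECONDITION & SPEC =====
def Spec_enumerate_coprime_kcliques (n : Int) (k : Int) (out : List (List Int)) : Prop := out = enumerate_coprime_kcliques_alt n k
instance (n : Int) (k : Int) (out : List (List Int)) : Decidable (Spec_enumerate_coprime_kcliques n k out) := by unfold Spec_enumerate_coprime_kcliques; infer_instance

-- ===== CLAIM (what is proved, stated in full; the proofs are below) =====
def Claim_equal_enumerate_coprime_kcliques : Prop := ∀ (n : Int) (k : Int), Dom_enumerate_coprime_kcliques n k → Spec_enumerate_coprime_kcliques n k (enumerate_coprime_kcliques n k)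

-- ===== LEMMAS AND PROOFS =====

-- the freshly initialised adjacency dict maps everything to []
theorem getD_init (L : List Int) (d : PySem.Dict Int (PySem.Set Int))
    (h : ∀ u : Int, d.getD u [] = []) (u : Int) :
    ((L.foldl (fun d v => d.insert v []) d).getD u []) = [] := by
  induction L generalizing d with
  | nil => exact h u
  | cons x xs ih =>
      simp only [List.foldl_cons]
      exact ih _ (fun u => by rw [PySem.Dict.getD_insert]; split <;> simp [h])

-- one inner loop 'for j in range(i+1, n+1)' adds j to adj[i] and i to adj[j] when coprime
theorem inner_mem (i : Int) (L : List Int) (hL : i ∉ L) :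
    ∀ (d : PySem.Dict Int (PySem.Set Int)) (u v : Int),
    (v ∈ (L.foldl (fun d j => if Int.gcd i j = 1 then
        (d.modify i [] (fun s => PySem.Set.add s j)).modify j [] (fun s => PySem.Set.add s i)
      else d) d).getD u [])
    ↔ (v ∈ d.getD u [] ∨ (u = i ∧ v ∈ L ∧ Int.gcd i v = 1) ∨ (v = i ∧ u ∈ L ∧ Int.gcd i u = 1)) := by
  induction L with
  | nil => simp
  | cons j L' ih =>
      intro d u v
      have hij : i ≠ j := fun h => hL (h ▸ List.mem_cons_self ..)
      have hL' : i ∉ L' := fun h => hL (List.mem_cons_of_mem _ h)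
      simp only [List.foldl_cons]
      by_cases hg : Int.gcd i j = 1
      · rw [if_pos hg, ih hL']
        simp only [PySem.Dict.getD_modify]
        split_ifs with h1 h2 h2
        · exact absurd h2.symm hij
        · subst h1
          simp only [PySem.Set.mem_add, List.mem_cons]
          constructor
          · rintro ((h | rfl) | ⟨h, _, _⟩ | ⟨h3, h4, h5⟩)
            · exact Or.inl h
            · exact Or.inr (Or.inr ⟨rfl, Or.inl trivial, hg⟩)
            · exact absurd h h2
            · exact Or.inr (Or.inr ⟨h3, Or.inr h4, h5⟩)
          · rintro (h | ⟨h, _, _⟩ | ⟨h3, (h4 | h4), h5⟩)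
            · exact Or.inl (Or.inl h)
            · exact absurd h h2
            · exact Or.inl (Or.inr h3)
            · exact Or.inr (Or.inr ⟨h3, h4, h5⟩)
        · subst h2
          simp only [PySem.Set.mem_add, List.mem_cons]
          constructor
          · rintro ((h | rfl) | ⟨_, h4, h5⟩ | ⟨h3, h4, h5⟩)
            · exact Or.inl h
            · exact Or.inr (Or.inl ⟨trivial, Or.inl rfl, hg⟩)
            · exact Or.inr (Or.inl ⟨trivial, Or.inr h4, h5⟩)
            · exact absurd h4 hL'
          · rintro (h | ⟨_, (h4 | h4), h5⟩ | ⟨h3, (h4 | h4), h5⟩)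
            · exact Or.inl (Or.inl h)
            · exact Or.inl (Or.inr h4)
            · exact Or.inr (Or.inl ⟨trivial, h4, h5⟩)
            · exact absurd h4 hij
            · exact absurd h4 hL'
        · simp only [List.mem_cons]
          constructor
          · rintro (h | ⟨h, _, _⟩ | ⟨h3, h4, h5⟩)
            · exact Or.inl h
            · exact absurd h h2
            · exact Or.inr (Or.inr ⟨h3, Or.inr h4, h5⟩)
          · rintro (h | ⟨h, _, _⟩ | ⟨h3, (h4 | h4), h5⟩)
            · exact Or.inl h
            · exact absurd h h2
            · exact absurd h4 h1
            · exact Or.inr (Or.inr ⟨h3, h4, h5⟩)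
      · rw [if_neg hg, ih hL']
        simp only [List.mem_cons]
        constructor
        · tauto
        · rintro (h | ⟨h1, (h2 | h2), h3⟩ | ⟨h1, (h2 | h2), h3⟩)
          · tauto
          · exact absurd (h2 ▸ h3) hg
          · tauto
          · exact absurd (h2 ▸ h3) hg
          · tauto

-- the whole double loop
theorem outer_mem (n : Int) (M : List Int) :
    ∀ (d : PySem.Dict Int (PySem.Set Int)) (u v : Int),
    (v ∈ (M.foldl (fun d i =>
        (PySem.List.pyRange (i + 1) (n + 1)).foldl (fun d j => if Int.gcd i j = 1 then
            (d.modify i [] (fun s => PySem.Set.add s j)).modify j [] (fun s => PySem.Set.add s i)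
          else d) d) d).getD u [])
    ↔ (v ∈ d.getD u [] ∨ ∃ i ∈ M, (u = i ∧ i < v ∧ v ≤ n ∧ Int.gcd i v = 1)
        ∨ (v = i ∧ i < u ∧ u ≤ n ∧ Int.gcd i u = 1)) := by
  induction M with
  | nil => simp
  | cons m M' ih =>
      intro d u v
      simp only [List.foldl_cons]
      rw [ih]
      rw [inner_mem m _ (by rw [PySem.List.mem_pyRange_one]; omega)]
      simp only [PySem.List.mem_pyRange_one, List.mem_cons]
      constructor
      · rintro ((h | ⟨h1, h2, h3⟩ | ⟨h1, h2, h3⟩) | ⟨i, hi, h⟩)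
        · tauto
        · exact Or.inr ⟨m, Or.inl rfl, Or.inl ⟨h1, by omega, by omega, h3⟩⟩
        · exact Or.inr ⟨m, Or.inl rfl, Or.inr ⟨h1, by omega, by omega, h3⟩⟩
        · exact Or.inr ⟨i, Or.inr hi, h⟩
      · rintro (h | ⟨i, (rfl | hi), (⟨h1, h2, h3, h4⟩ | ⟨h1, h2, h3, h4⟩)⟩)
        · tauto
        · exact Or.inl (Or.inr (Or.inl ⟨h1, by omega, h4⟩))
        · exact Or.inl (Or.inr (Or.inr ⟨h1, by omega, h4⟩))
        · exact Or.inr ⟨i, hi, Or.inl ⟨h1, h2, h3, h4⟩⟩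
        · exact Or.inr ⟨i, hi, Or.inr ⟨h1, h2, h3, h4⟩⟩

-- membership in the adjacency dict, characterised
theorem adj_contains (n u v : Int) :
    PySem.Set.contains ((coprime_adjacency n).getD u []) v = true ↔
      (1 ≤ u ∧ u ≤ n ∧ 1 ≤ v ∧ v ≤ n ∧ Int.gcd u v = 1 ∧ u ≠ v) := by
  rw [PySem.Set.contains_iff]
  simp only [coprime_adjacency]
  rw [outer_mem]
  rw [getD_init _ _ (fun u => PySem.Dict.getD_empty u [])]
  simp only [List.not_mem_nil, false_or]
  constructor
  · rintro ⟨i, hi, (⟨rfl, h2, h3, h4⟩ | ⟨rfl, h2, h3, h4⟩)⟩ <;>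
      rw [PySem.List.mem_pyRange_one] at hi
    · exact ⟨hi.1, by omega, by omega, h3, h4, by omega⟩
    · exact ⟨by omega, h3, hi.1, by omega, by rw [Int.gcd_comm]; exact h4, by omega⟩
  · rintro ⟨h1, h2, h3, h4, h5, h6⟩
    rcases lt_or_gt_of_ne h6 with hlt | hlt
    · exact ⟨u, by rw [PySem.List.mem_pyRange_one]; omega, Or.inl ⟨rfl, hlt, h4, h5⟩⟩
    · exact ⟨v, by rw [PySem.List.mem_pyRange_one]; omega,
        Or.inr ⟨rfl, hlt, h2, by rw [Int.gcd_comm]; exact h5⟩⟩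

-- contains as a decide, on in-range distinct arguments
theorem contains_eq_decide (n u v : Int) (hu : 1 ≤ u ∧ u ≤ n) (hv : 1 ≤ v ∧ v ≤ n) (hne : u ≠ v) :
    PySem.Set.contains ((coprime_adjacency n).getD u []) v = decide (Int.gcd u v = 1) := by
  by_cases hg : Int.gcd u v = 1
  · simp only [hg, decide_true]
    exact (adj_contains n u v).mpr ⟨hu.1, hu.2, hv.1, hv.2, hg, hne⟩
  · simp only [hg, decide_false]
    rw [← Bool.not_eq_true]
    intro hc
    exact hg ((adj_contains n u v).mp hc).2.2.2.2.1

-- the per-value coprime-successor set, characterised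
theorem getD_foldl_insert_val (L : List Int) (f : Int → PySem.Set Int)
    (d : PySem.Dict Int (PySem.Set Int)) (v : Int) :
    ((L.foldl (fun d x => d.insert x (f x)) d).getD v []) = if v ∈ L then f v else d.getD v [] := by
  induction L generalizing d with
  | nil => simp
  | cons x xs ih =>
      rw [List.foldl_cons, ih]
      by_cases h1 : v ∈ xs
      · simp [h1]
      · by_cases h2 : v = x
        · subst h2
          simp [h1, PySem.Dict.getD_insert]
        · simp [h1, h2, PySem.Dict.getD_insert]

theorem succ_contains (n v w : Int) (hv : 1 ≤ v ∧ v ≤ n) :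
    PySem.Set.contains ((succD n).getD v []) w = true ↔ (v < w ∧ w ≤ n ∧ Int.gcd v w = 1) := by
  rw [PySem.Set.contains_iff]
  unfold succD
  rw [getD_foldl_insert_val, if_pos (PySem.List.mem_pyRange_one.mpr (by omega))]
  rw [PySem.Set.mem_ofList, List.mem_filter, PySem.List.mem_pyRange_one, beq_iff_eq]
  constructor
  · rintro ⟨⟨h1, h2⟩, h3⟩
    exact ⟨by omega, by omega, h3⟩
  · rintro ⟨h1, h2, h3⟩
    exact ⟨⟨by omega, by omega⟩, h3⟩

-- the two candidate filters agree (both test coprimality) on in-range ascending members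
theorem filters_agree (n v : Int) (rest : List Int) (hv : 1 ≤ v ∧ v ≤ n)
    (hrest : ∀ w ∈ rest, (1 ≤ w ∧ w ≤ n) ∧ v < w) :
    rest.filter (fun w => PySem.Set.contains ((coprime_adjacency n).getD v []) w)
      = rest.filter (fun w => PySem.Set.contains ((succD n).getD v []) w) :=
  List.filter_congr (fun w hw => by
    rcases hrest w hw with ⟨⟨hw1, hw2⟩, hvw⟩
    rw [contains_eq_decide n v w hv ⟨hw1, hw2⟩ (by omega)]
    by_cases hg : Int.gcd v w = 1
    · simp only [hg, decide_true]
      exact ((succ_contains n v w hv).mpr ⟨hvw, hw2, hg⟩).symm ▸ rfl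
    · simp only [hg, decide_false]
      rw [eq_comm, ← Bool.not_eq_true]
      intro hc
      exact hg ((succ_contains n v w hv).mp hc).2.2)

-- bridge: one pass of A's candidate loop = the extension list of B, each followed by btkA
theorem loop_eq_exts (n k : Int) :
    ∀ (cand : List Int) (s : List Int),
      List.Pairwise (· < ·) cand →
      (∀ x ∈ s, ∀ y ∈ cand, x < y) →
      (∀ y ∈ cand, 1 ≤ y ∧ y ≤ n) →
      (∀ x ∈ s, 1 ≤ x ∧ x ≤ n) →
      (∀ x ∈ s, ∀ y ∈ cand, Int.gcd x y = 1) →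
      btkLoop (coprime_adjacency n) k s cand
        = (extsB k s (succD n) cand).flatMap
            (fun p => btkA (coprime_adjacency n) k p.1 p.2) := by
  intro cand
  induction cand with
  | nil => intro s _ _ _ _ _; rw [btkLoop]; rfl
  | cons v rest ih =>
      intro s hpw hsc hcn hsn hcop
      have hv : 1 ≤ v ∧ v ≤ n := hcn v (List.mem_cons_self ..)
      rw [btkLoop, extsB]
      split
      · rfl
      · have hchk : (s.all fun u => PySem.Set.contains ((coprime_adjacency n).getD u []) v) = true :=
          List.all_eq_true.mpr (fun u hu =>
            (contains_eq_decide n u v (hsn u hu) hv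
              (by have := hsc u hu v (List.mem_cons_self ..); omega)).trans
            (decide_eq_true (hcop u hu v (List.mem_cons_self ..))))
        rw [if_pos hchk]
        rw [List.flatMap_cons]
        rw [filters_agree n v rest hv (fun w hw =>
          ⟨hcn w (List.mem_cons_of_mem _ hw), (List.pairwise_cons.mp hpw).1 w hw⟩)]
        rw [ih s (List.pairwise_cons.mp hpw).2
          (fun x hx y hy => hsc x hx y (List.mem_cons_of_mem _ hy))
          (fun y hy => hcn y (List.mem_cons_of_mem _ hy)) hsn
          (fun x hx y hy => hcop x hx y (List.mem_cons_of_mem _ hy))]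

-- decomposing membership in extsB
theorem mem_extsB (k : Int) (s : List Int) (sd : PySem.Dict Int (PySem.Set Int)) :
    ∀ (cand : List Int) (p : List Int × List Int), p ∈ extsB k s sd cand →
      ∃ v rest, p = (s ++ [v], rest.filter (fun w => PySem.Set.contains (sd.getD v []) w))
        ∧ (v :: rest).Sublist cand := by
  intro cand
  induction cand with
  | nil => intro p hp; simp [extsB] at hp
  | cons v rest ih =>
      intro p hp
      rw [extsB] at hp
      split at hp
      · simp at hp
      · rcases List.mem_cons.mp hp with hp | hp
        · exact ⟨v, rest, hp, List.Sublist.refl _⟩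
        · rcases ih p hp with ⟨v', rest', heq, hsub⟩
          exact ⟨v', rest', heq, hsub.trans (List.sublist_cons_self ..)⟩

-- the stack invariant for B's worklist entries
def InvP (n k : Int) (p : List Int × List Int) : Prop :=
  List.Pairwise (· < ·) p.2 ∧ (∀ x ∈ p.1, ∀ y ∈ p.2, x < y) ∧
  (∀ y ∈ p.2, 1 ≤ y ∧ y ≤ n) ∧ (∀ x ∈ p.1, 1 ≤ x ∧ x ≤ n) ∧
  (∀ x ∈ p.1, ∀ y ∈ p.2, Int.gcd x y = 1) ∧ ((p.1.length : Int) ≤ k)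

-- the worklist loop flushes each entry's whole backtracking subtree, in order
theorem dfs_eq (n k : Int) (M : Nat) :
    ∀ (st : List (List Int × List Int)),
      (st.map (fun p => (p.2.length + 1).factorial)).sum ≤ M →
      (∀ p ∈ st, InvP n k p) → ∀ out,
      dfsB k (succD n) out st
        = out ++ st.flatMap (fun p => btkA (coprime_adjacency n) k p.1 p.2) := by
  induction M with
  | zero =>
      intro st hM hinv out
      match st, hM with
      | [], _ => simp [dfsB]
      | (s, cand) :: rest, hM =>
          exfalso
          simp only [List.map_cons, List.sum_cons] at hM
          have := Nat.factorial_pos (cand.length + 1)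
          omega
  | succ M ih =>
      intro st hM hinv out
      match st with
      | [] => simp [dfsB]
      | (s, cand) :: rest =>
          simp only [List.map_cons, List.sum_cons] at hM
          have hfp := Nat.factorial_pos (cand.length + 1)
          rcases hinv _ (List.mem_cons_self ..) with ⟨hpw, hsc, hcn, hsn, hcop, hsk⟩
          by_cases hk : (s.length : Int) = k
          · rw [dfsB, if_pos hk]
            rw [ih rest (by omega) (fun p hp => hinv p (List.mem_cons_of_mem _ hp)) (out ++ [s])]
            rw [List.flatMap_cons]
            rw [show btkA (coprime_adjacency n) k s cand = [s] from by rw [btkA, if_pos hk]]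
            simp
          · rw [dfsB, if_neg hk]
            have hext : ∀ p ∈ extsB k s (succD n) cand, InvP n k p := by
              intro p hp
              rcases mem_extsB k s (succD n) cand p hp with ⟨v, rest', rfl, hsub⟩
              have hvrest : List.Pairwise (· < ·) (v :: rest') := hpw.sublist hsub
              have hvmem : v ∈ cand := hsub.mem (List.mem_cons_self ..)
              have hrmem : ∀ w ∈ rest', w ∈ cand :=
                fun w hw => hsub.mem (List.mem_cons_of_mem _ hw)
              have hv : 1 ≤ v ∧ v ≤ n := hcn v hvmem
              have hsk' : (s.length : Int) ≤ k := hsk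
              have hkne : (s.length : Int) ≠ k := hk
              refine ⟨?_, ?_, ?_, ?_, ?_, ?_⟩
              · exact (List.pairwise_cons.mp hvrest).2.sublist (List.filter_sublist ..)
              · intro x hx y hy
                have hy' : y ∈ rest' := List.mem_of_mem_filter hy
                rcases List.mem_append.mp hx with hx | hx
                · exact hsc x hx y (hrmem y hy')
                · simp only [List.mem_singleton] at hx
                  exact hx ▸ (List.pairwise_cons.mp hvrest).1 y hy'
              · exact fun y hy => hcn y (hrmem y (List.mem_of_mem_filter hy))
              · intro x hx
                rcases List.mem_append.mp hx with hx | hx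
                · exact hsn x hx
                · simp only [List.mem_singleton] at hx
                  exact hx ▸ hv
              · intro x hx y hy
                rcases List.mem_filter.mp hy with ⟨hy', hyc⟩
                rcases List.mem_append.mp hx with hx | hx
                · exact hcop x hx y (hrmem y hy')
                · simp only [List.mem_singleton] at hx
                  subst hx
                  exact ((succ_contains n x y hv).mp hyc).2.2
              · simp only [List.length_append, List.length_cons, List.length_nil]
                push_cast
                omega
            rw [ih (extsB k s (succD n) cand ++ rest)
              (by
                simp only [List.map_append, List.sum_append]
                have := extsB_measure_lt k s (succD n) cand
                omega)
              (fun p hp => by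
                rcases List.mem_append.mp hp with hp | hp
                · exact hext p hp
                · exact hinv p (List.mem_cons_of_mem _ hp)) out]
            rw [List.flatMap_append, List.flatMap_cons]
            rw [show btkA (coprime_adjacency n) k s cand
                = btkLoop (coprime_adjacency n) k s cand from by rw [btkA, if_neg hk]]
            rw [loop_eq_exts n k cand s hpw hsc hcn hsn hcop]

-- ===== VERDICT (by name: the statement is the Claim_ definition above) =====
theorem enumerate_coprime_kcliques_spec : Claim_equal_enumerate_coprime_kcliques := by
  intro n k _
  unfold Spec_enumerate_coprime_kcliques enumerate_coprime_kcliques enumerate_coprime_kcliques_alt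
  by_cases hg : k < 1 ∨ k > n
  · simp [hg]
  · simp only [if_neg hg]
    rw [not_or, not_lt, not_lt] at hg
    rw [dfs_eq n k ((((([] : List Int), PySem.List.pyRange 1 (n + 1))) :: []).map
        (fun p => (p.2.length + 1).factorial)).sum
      [(([] : List Int), PySem.List.pyRange 1 (n + 1))] le_rfl
      (fun p hp => by
        rcases List.mem_singleton.mp hp with rfl
        exact ⟨PySem.List.pairwise_lt_pyRange_one 1 (n + 1), by simp,
          fun y hy => by rw [PySem.List.mem_pyRange_one] at hy; omega,
          by simp, by simp, by simp; omega⟩) []]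
    simp
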